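-- pv_equiv track=rewrite | github.com/jaimie453/ResServicesChallenge1 | add_array.py | int_to_array
-- ===== SOURCE A (Python) =====
-- def int_to_array(n, array_size):
--     # need new array length if sum has more digits than a
--     n_digits = get_digits(n)
--     if n_digits > array_size:
--         array_size = n_digits
--
--     result = [0] * array_size
--
--     temp = n
--     # start pos for inserting new nums
--     i = len(result) - 1
--     while temp > 0:
--         # get rightmost digit
--         digit = temp % 10
--         result[i] = digit
--
--         # remove rightmost digit
--         temp = temp // 10
--         i -= 1
--
--     return result
--
-- def get_digits(n):
--     temp = n
--     digits = 0
--     while temp > 0: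
--         temp = temp // 10
--         digits += 1
--
--     return digits
-- ===== SOURCE B (Python) =====
-- def int_to_array(n, array_size):
--     # Collect digits least-significant first, reverse, then left-pad with zeros.
--     digits = []
--     temp = n
--     while temp > 0:
--         digits.append(temp % 10)
--         temp //= 10
--     digits.reverse()
--     return [0] * (array_size - len(digits)) + digits
-- ===== Notes on version B (the rewrite author's own statement) =====
-- stated objective: simpler
-- what changed: Replaces A's two passes (count digits, then pre-size an array and index-write from the right) by one digit-collection loop followed by a reverse and a prepended zero pad.
import Mathlib
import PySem

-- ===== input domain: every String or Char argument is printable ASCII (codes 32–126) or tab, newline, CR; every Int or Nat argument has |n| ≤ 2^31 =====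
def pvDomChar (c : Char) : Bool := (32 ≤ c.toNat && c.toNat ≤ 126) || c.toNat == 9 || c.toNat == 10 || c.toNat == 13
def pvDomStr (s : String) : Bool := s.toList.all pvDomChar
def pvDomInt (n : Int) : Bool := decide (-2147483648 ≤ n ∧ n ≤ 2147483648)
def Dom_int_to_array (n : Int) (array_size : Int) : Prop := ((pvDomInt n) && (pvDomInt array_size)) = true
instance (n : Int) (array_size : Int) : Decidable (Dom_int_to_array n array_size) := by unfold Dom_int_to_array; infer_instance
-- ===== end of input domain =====

-- B replaces A's count-then-index-write scheme by collect-reverse-pad; objective: simpler.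

-- termination helper for the digit loops
theorem pv_fdiv10_toNat_lt (t : Int) (h : 0 < t) : (PySem.Int.floordiv t 10).toNat < t.toNat := by
  rw [PySem.Int.floordiv_eq_ediv_of_pos (by norm_num)]; omega

-- ===== PORT A =====
-- while temp > 0: temp //= 10; digits += 1
def get_digits_loop (temp : Int) (digits : Int) : Int :=
  if 0 < temp then get_digits_loop (PySem.Int.floordiv temp 10) (digits + 1) else digits
termination_by temp.toNat
decreasing_by exact pv_fdiv10_toNat_lt _ (by omega)

def get_digits (n : Int) : Int := get_digits_loop n 0

-- while temp > 0: result[i] = temp % 10; temp //= 10; i -= 1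
-- (result[i] = … ported with pySetD: i stays in range whenever the loop body runs)
def int_to_array_loop (result : List Int) (temp : Int) (i : Int) : List Int :=
  if 0 < temp then
    int_to_array_loop (PySem.List.pySetD result i (PySem.Int.mod temp 10))
      (PySem.Int.floordiv temp 10) (i - 1)
  else result
termination_by temp.toNat
decreasing_by exact pv_fdiv10_toNat_lt _ (by omega)

def int_to_array (n : Int) (array_size : Int) : List Int :=
  let n_digits := get_digits n
  let array_size := if n_digits > array_size then n_digits else array_size
  let result : List Int := List.replicate array_size.toNat 0   -- [0] * array_size ([] when negative)
  int_to_array_loop result n ((result.length : Int) - 1)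

-- ===== PORT B =====
-- while temp > 0: digits.append(temp % 10); temp //= 10
def collect_digits (temp : Int) (digits : List Int) : List Int :=
  if 0 < temp then collect_digits (PySem.Int.floordiv temp 10) (digits ++ [PySem.Int.mod temp 10])
  else digits
termination_by temp.toNat
decreasing_by exact pv_fdiv10_toNat_lt _ (by omega)

def int_to_array_alt (n : Int) (array_size : Int) : List Int :=
  let digits := (collect_digits n []).reverse
  List.replicate (array_size - (digits.length : Int)).toNat 0 ++ digits

-- ===== PRECONDITION & SPEC =====
def Spec_int_to_array (n : Int) (array_size : Int) (out : List Int) : Prop := out = int_to_array_alt n array_size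
instance (n : Int) (array_size : Int) (out : List Int) : Decidable (Spec_int_to_array n array_size out) := by unfold Spec_int_to_array; infer_instance

-- ===== CLAIM (what is proved, stated in full; the proofs are below) =====
def Claim_equal_int_to_array : Prop := ∀ (n : Int) (array_size : Int), Dom_int_to_array n array_size → Spec_int_to_array n array_size (int_to_array n array_size)

-- ===== LEMMAS AND PROOFS =====

theorem collect_acc (t : Int) (acc : List Int) :
    collect_digits t acc = acc ++ collect_digits t [] := by
  by_cases h : 0 < t
  · conv_lhs => rw [collect_digits]
    conv_rhs => rw [collect_digits]
    rw [if_pos h, if_pos h,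
      collect_acc (PySem.Int.floordiv t 10) (acc ++ [PySem.Int.mod t 10]),
      collect_acc (PySem.Int.floordiv t 10) (([] : List Int) ++ [PySem.Int.mod t 10])]
    simp
  · conv_lhs => rw [collect_digits]
    conv_rhs => rw [collect_digits]
    rw [if_neg h, if_neg h]; simp
termination_by t.toNat
decreasing_by all_goals exact pv_fdiv10_toNat_lt _ (by omega)

theorem collect_step (t : Int) (h : 0 < t) :
    collect_digits t [] = PySem.Int.mod t 10 :: collect_digits (PySem.Int.floordiv t 10) [] := by
  conv_lhs => rw [collect_digits]
  rw [if_pos h, collect_acc]; simp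

theorem get_digits_loop_eq (t : Int) (c : Int) :
    get_digits_loop t c = c + ((collect_digits t []).length : Int) := by
  by_cases h : 0 < t
  · conv_lhs => rw [get_digits_loop]
    rw [if_pos h, collect_step t h,
      get_digits_loop_eq (PySem.Int.floordiv t 10) (c + 1)]
    simp; ring
  · conv_lhs => rw [get_digits_loop]
    rw [if_neg h, collect_digits, if_neg h]; simp
termination_by t.toNat
decreasing_by all_goals exact pv_fdiv10_toNat_lt _ (by omega)

-- main loop characterisation
theorem loop_char (t : Int) (r : List Int) (i : Int)
    (ht : 0 < t) (hlen : ((collect_digits t []).length : Int) ≤ i + 1)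
    (hi : i < (r.length : Int)) :
    int_to_array_loop r t i =
      r.take (i + 1 - ((collect_digits t []).length : Int)).toNat
        ++ (collect_digits t []).reverse ++ r.drop (i + 1).toNat := by
  have hstep := collect_step t ht
  have hlen1 : 1 ≤ (collect_digits t []).length := by rw [hstep]; simp
  have hi0 : 0 ≤ i := by omega
  conv_lhs => rw [int_to_array_loop]
  rw [if_pos ht]
  have hset : PySem.List.pySetD r i (PySem.Int.mod t 10) =
      r.take i.toNat ++ [PySem.Int.mod t 10] ++ r.drop (i.toNat + 1) := by
    rw [PySem.List.pySetD_of_nonneg r (PySem.Int.mod t 10) hi0,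
      List.set_eq_take_cons_drop _ (by omega)]
    simp
  have hTlen : (r.take i.toNat).length = i.toNat := by simp; omega
  by_cases h2 : 0 < PySem.Int.floordiv t 10
  · have hlen2 : (collect_digits (PySem.Int.floordiv t 10) []).length + 1 =
        (collect_digits t []).length := by rw [hstep]; simp
    rw [loop_char (PySem.Int.floordiv t 10) _ (i - 1) h2 (by omega)
      (by rw [hset]; simp; omega)]
    rw [hset]
    simp only [hstep, List.length_cons, List.reverse_cons, Nat.cast_add, Nat.cast_one]
    conv_lhs => rw [List.append_assoc (r.take i.toNat)]
    rw [List.take_append_of_le_length (by rw [hTlen]; omega), List.take_take]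
    have h1 : ((i - 1 + 1).toNat) = (r.take i.toNat).length := by rw [hTlen]; omega
    conv_lhs => rw [h1, List.drop_left]
    have hmin : min (i - 1 + 1 - ((collect_digits (PySem.Int.floordiv t 10) []).length : Int)).toNat i.toNat
        = (i + 1 - (((collect_digits (PySem.Int.floordiv t 10) []).length : Int) + 1)).toNat := by omega
    have e5 : (i + 1).toNat = i.toNat + 1 := by omega
    rw [hmin, e5]
    simp [List.append_assoc]
  · have hz : collect_digits (PySem.Int.floordiv t 10) [] = [] := by
      rw [collect_digits, if_neg h2]
    conv_lhs => rw [int_to_array_loop]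
    rw [if_neg h2, hset]
    simp only [hstep, hz, List.length_cons, List.length_nil, List.reverse_cons,
      List.reverse_nil, List.nil_append, Nat.cast_one, zero_add]
    have e1 : (i + 1 - (1:Int)).toNat = i.toNat := by omega
    have e2 : (i + 1).toNat = i.toNat + 1 := by omega
    rw [e1, e2]
termination_by t.toNat
decreasing_by all_goals exact pv_fdiv10_toNat_lt _ (by omega)

theorem loop_nonpos (r : List Int) (t i : Int) (h : ¬ 0 < t) : int_to_array_loop r t i = r := by
  rw [int_to_array_loop, if_neg h]

-- ===== VERDICT (by name: the statement is the Claim_ definition above) =====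
theorem int_to_array_spec : Claim_equal_int_to_array := by
  intro n s _
  unfold Spec_int_to_array int_to_array int_to_array_alt
  simp only [get_digits, get_digits_loop_eq, zero_add]
  set d : Nat := (collect_digits n []).length with hd
  by_cases hn : 0 < n
  · have hd1 : 1 ≤ d := by
      rw [hd, collect_step n hn]; simp
    set L : Int := if (d : Int) > s then (d : Int) else s with hL
    have hLd : (d : Int) ≤ L := by rw [hL]; split <;> omega
    have hL0 : 0 < L := by omega
    rw [loop_char n _ _ hn (by simp; omega) (by simp; omega)]
    simp only [List.length_replicate]
    have e0 : ((L.toNat : Int) - 1 + 1) = (L.toNat : Int) := by omega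
    rw [e0]
    rw [List.take_replicate, List.drop_replicate]
    have e1 : min ((L.toNat : Int) - (d : Int)).toNat L.toNat = (s - (d : Int)).toNat := by
      rw [hL] at *; split at * <;> omega
    have e2 : L.toNat - ((L.toNat : Int)).toNat = 0 := by omega
    rw [e1, e2]
    simp [List.length_reverse]
    rw [hd]
  · have hz : collect_digits n [] = [] := by rw [collect_digits, if_neg hn]
    rw [loop_nonpos _ _ _ hn]
    rw [hz] at hd
    simp only [hd, hz, List.reverse_nil, List.append_nil, List.length_nil,
      Nat.cast_zero, sub_zero]
    congr 1
    split <;> omega
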